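-- pv_equiv track=rewrite | github.com/HGUISEL/TIBigdataMiddleware | TextMining/Tokenizer/kubic_morph.py | make_return_result_list
-- ===== SOURCE A (Python) =====
-- def make_return_result_list(docList):
--     result = list()
--     for doc in docList:
--         docToken = []
--         for sentence in doc:
--             for corpus in sentence:
--                 docToken.append(corpus)
--                 if len(docToken) == 10:
--                     break
--             if len(docToken) == 10:
--                     break
--         result.append(docToken)
--     return result
-- ===== SOURCE B (Python) =====
-- def _first10(doc):
--     parts = []
--     budget = 10
--     for sentence in doc:
--         if budget == 0:
--             break
--         head = sentence[:budget]
--         parts.append(head)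
--         budget -= len(head)
--     out = []
--     for p in parts:
--         out += p
--     return out
--
--
-- def make_return_result_list(docList):
--     return [_first10(doc) for doc in docList]
-- ===== Notes on version B (the rewrite author's own statement) =====
-- stated objective: alternative
-- what changed: A streams tokens one by one with a counter and duplicated break guards; B never touches individual tokens in its loop: per document it slices whole sentences against a decreasing budget (sentence[:budget]), stops when the budget is exhausted, and concatenates the collected slices in a second stage.
import Mathlib
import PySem

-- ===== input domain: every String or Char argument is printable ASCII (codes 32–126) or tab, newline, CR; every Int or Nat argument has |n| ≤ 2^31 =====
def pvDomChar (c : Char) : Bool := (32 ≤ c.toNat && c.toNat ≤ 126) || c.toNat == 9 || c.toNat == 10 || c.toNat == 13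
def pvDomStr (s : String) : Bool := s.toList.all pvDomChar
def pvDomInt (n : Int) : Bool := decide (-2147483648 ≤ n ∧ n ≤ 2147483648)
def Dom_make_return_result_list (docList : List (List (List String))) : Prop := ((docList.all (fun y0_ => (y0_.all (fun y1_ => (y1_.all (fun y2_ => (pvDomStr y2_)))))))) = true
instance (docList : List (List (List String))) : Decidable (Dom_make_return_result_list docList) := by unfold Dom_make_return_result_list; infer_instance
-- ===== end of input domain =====

-- B replaces A's token-at-a-time counter loop with budget-driven whole-sentence slicing plus a concatenation stage (alternative decomposition, same cost).

-- ===== PORT A =====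
-- inner loop: append each corpus token, break as soon as docToken has 10 tokens
def pvFillSentence (acc : List String) : List String → List String
  | [] => acc
  | c :: rest =>
    let acc' := acc ++ [c]
    if acc'.length = 10 then acc' else pvFillSentence acc' rest

-- outer loop over sentences, with the duplicated "if len == 10: break" guard
def pvFillDoc (acc : List String) : List (List String) → List String
  | [] => acc
  | s :: rest =>
    let acc' := pvFillSentence acc s
    if acc'.length = 10 then acc' else pvFillDoc acc' rest

def make_return_result_list (docList : List (List (List String))) : List (List String) :=
  docList.foldl (fun result doc => result ++ [pvFillDoc [] doc]) []

-- ===== PORT B =====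
-- stage 1 of _first10: collect sentence[:budget] slices, budget decreasing, stop at 0
def pvCollect : List (List String) → Nat → List (List String)
  | [], _ => []
  | s :: rest, budget =>
    if budget = 0 then []
    else
      let head := s.take budget
      head :: pvCollect rest (budget - head.length)

-- stage 2 of _first10: concatenate the collected parts
def make_return_result_list_alt (docList : List (List (List String))) : List (List String) :=
  docList.map (fun doc => (pvCollect doc 10).foldl (fun out p => out ++ p) [])

-- ===== PRECONDITION & SPEC =====
def Spec_make_return_result_list (docList : List (List (List String))) (out : List (List String)) : Prop := out = make_return_result_list_alt docList
instance (docList : List (List (List String))) (out : List (List String)) : Decidable (Spec_make_return_result_list docList out) := by unfold Spec_make_return_result_list; infer_instance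

-- ===== CLAIM (what is proved, stated in full; the proofs are below) =====
def Claim_equal_make_return_result_list : Prop := ∀ (docList : List (List (List String))), Dom_make_return_result_list docList → Spec_make_return_result_list docList (make_return_result_list docList)

-- ===== LEMMAS AND PROOFS =====

lemma take_append_take (l m : List String) (n : ℕ) :
    (l.take n ++ m).take n = (l ++ m).take n := by
  simp [List.take_append, List.take_take, List.length_take]
  rcases Nat.le_total l.length n with h | h
  · simp [Nat.min_eq_right h]
  · simp [Nat.min_eq_left h, Nat.sub_eq_zero_of_le h]

lemma pvFillSentence_eq (s : List String) : ∀ (acc : List String), acc.length < 10 →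
    pvFillSentence acc s = (acc ++ s).take 10 := by
  induction s with
  | nil => intro acc h; simp [pvFillSentence, List.take_of_length_le (Nat.le_of_lt h)]
  | cons c rest ih =>
    intro acc h
    simp only [pvFillSentence]
    by_cases h10 : (acc ++ [c]).length = 10
    · simp only [h10, if_true]
      have : (acc ++ c :: rest) = (acc ++ [c]) ++ rest := by simp
      rw [this, List.take_append, h10]
      simp [List.take_of_length_le (le_of_eq h10)]
    · simp only [h10, if_false]
      have hlt : (acc ++ [c]).length < 10 := by
        simp at h10 ⊢; omega
      rw [ih _ hlt]; simp

lemma pvFillDoc_eq (doc : List (List String)) : ∀ (acc : List String), acc.length < 10 →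
    pvFillDoc acc doc = (acc ++ doc.flatten).take 10 := by
  induction doc with
  | nil => intro acc h; simp [pvFillDoc, List.take_of_length_le (Nat.le_of_lt h)]
  | cons s rest ih =>
    intro acc h
    simp only [pvFillDoc, pvFillSentence_eq s acc h]
    by_cases h10 : ((acc ++ s).take 10).length = 10
    · simp only [h10, if_true]
      have hlen : 10 ≤ (acc ++ s).length := by
        rw [List.length_take] at h10; omega
      have hflat : acc ++ (s :: rest).flatten = (acc ++ s) ++ rest.flatten := by simp
      rw [hflat]
      exact (List.take_append_of_le_length hlen).symm
    · simp only [h10, if_false]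
      have hlt : ((acc ++ s).take 10).length < 10 := by
        have := List.length_take_le 10 (acc ++ s); omega
      rw [ih _ hlt, take_append_take]
      simp

lemma pvCollect_flatten (doc : List (List String)) : ∀ (k : ℕ),
    (pvCollect doc k).flatten = doc.flatten.take k := by
  induction doc with
  | nil => intro k; simp [pvCollect]
  | cons s rest ih =>
    intro k
    by_cases hk : k = 0
    · simp [pvCollect, hk]
    · simp only [pvCollect, hk, if_false, List.flatten_cons, ih]
      rw [List.take_append]
      congr 1
      simp [List.length_take]
      omega

lemma foldl_append_flatten (ps : List (List String)) : ∀ (out : List String),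
    ps.foldl (fun out p => out ++ p) out = out ++ ps.flatten := by
  induction ps with
  | nil => intro out; simp
  | cons p rest ih => intro out; simp [List.foldl_cons, ih]

lemma foldl_docs (docList : List (List (List String))) : ∀ (res : List (List String)),
    docList.foldl (fun result doc => result ++ [pvFillDoc [] doc]) res
      = res ++ docList.map (fun doc => (pvCollect doc 10).foldl (fun out p => out ++ p) []) := by
  induction docList with
  | nil => intro res; simp
  | cons d rest ih =>
    intro res
    simp only [List.foldl_cons, List.map_cons, ih, pvFillDoc_eq d [] (by simp),
      foldl_append_flatten, pvCollect_flatten]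
    simp

-- ===== VERDICT (by name: the statement is the Claim_ definition above) =====
theorem make_return_result_list_spec : Claim_equal_make_return_result_list := by
  intro docList _
  unfold Spec_make_return_result_list make_return_result_list make_return_result_list_alt
  simpa using foldl_docs docList []
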